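-- pv_equiv track=rewrite | github.com/KING000T/web-scraper-ai | scrapers/base.py | validate_selector
-- ===== SOURCE A (Python) =====
-- def validate_selector(selector: str) -> bool:
--     """Validate CSS selector syntax"""
--     try:
--         # Basic validation - check for balanced brackets
--         if selector.count('[') != selector.count(']'):
--             return False
--         if selector.count('(') != selector.count(')'):
--             return False
--
--         # Check for invalid characters
--         invalid_chars = ['<', '>', '"', "'"]
--         if any(char in selector for char in invalid_chars):
--             return False
--
--         return True
--     except Exception:
--         return False
-- ===== SOURCE B (Python) =====
-- def validate_selector(selector: str) -> bool:
--     """Validate CSS selector syntax (single pass)"""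
--     try:
--         sq = 0
--         par = 0
--         for ch in selector:
--             if ch in '<>"\'':
--                 return False
--             elif ch == '[':
--                 sq += 1
--             elif ch == ']':
--                 sq -= 1
--             elif ch == '(':
--                 par += 1
--             elif ch == ')':
--                 par -= 1
--         return sq == 0 and par == 0
--     except Exception:
--         return False
-- ===== Notes on version B (the rewrite author's own statement) =====
-- stated objective: simpler
-- what changed: Replaces four separate .count() scans plus an any() membership scan (up to six passes over the string) with one single loop over the characters maintaining two bracket-balance counters and returning False immediately on an invalid character.
import Mathlib
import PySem

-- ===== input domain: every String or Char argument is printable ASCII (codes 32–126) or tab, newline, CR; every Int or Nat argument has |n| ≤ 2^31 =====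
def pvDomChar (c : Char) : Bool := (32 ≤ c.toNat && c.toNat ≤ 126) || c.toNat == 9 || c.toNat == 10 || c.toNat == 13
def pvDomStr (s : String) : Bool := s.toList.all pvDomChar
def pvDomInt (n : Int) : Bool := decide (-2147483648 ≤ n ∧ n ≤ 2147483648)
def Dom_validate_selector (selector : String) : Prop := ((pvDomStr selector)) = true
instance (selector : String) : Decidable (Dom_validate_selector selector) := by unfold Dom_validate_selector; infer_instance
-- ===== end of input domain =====

-- B replaces A's four .count() scans and any() membership scan with one single
-- pass maintaining two bracket-balance counters (objective: simpler).

-- ===== PORT A =====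
def validate_selector (selector : String) : Bool :=
  if PySem.Str.count selector "[" ≠ PySem.Str.count selector "]" then false
  else if PySem.Str.count selector "(" ≠ PySem.Str.count selector ")" then false
  else if ["<", ">", "\"", "'"].any (fun ch => PySem.Str.isIn ch selector) then false
  else true

-- ===== PORT B =====
-- the for-loop of Source B with its two counters and early return
def vsLoop : List Char → Int → Int → Bool
  | [], sq, par => sq == 0 && par == 0
  | ch :: rest, sq, par =>
    if ch == '<' || ch == '>' || ch == '"' || ch == '\'' then false
    else if ch == '[' then vsLoop rest (sq + 1) par
    else if ch == ']' then vsLoop rest (sq - 1) par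
    else if ch == '(' then vsLoop rest sq (par + 1)
    else if ch == ')' then vsLoop rest sq (par - 1)
    else vsLoop rest sq par

def validate_selector_alt (selector : String) : Bool :=
  vsLoop selector.toList 0 0

-- ===== PRECONDITION & SPEC =====
def Spec_validate_selector (selector : String) (out : Bool) : Prop := out = validate_selector_alt selector
instance (selector : String) (out : Bool) : Decidable (Spec_validate_selector selector out) := by unfold Spec_validate_selector; infer_instance

-- ===== CLAIM (what is proved, stated in full; the proofs are below) =====
def Claim_equal_validate_selector : Prop := ∀ (selector : String), Dom_validate_selector selector → Spec_validate_selector selector (validate_selector selector)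

-- ===== LEMMAS AND PROOFS =====

-- Python's str.count of a single character is List.count
theorem count_go_singleton (c : Char) :
    ∀ (l : List Char) (fuel acc : Nat), l.length ≤ fuel →
      PySem.Chars.count.go [c] fuel l acc = acc + l.count c := by
  intro l
  induction l with
  | nil => intro fuel acc _; cases fuel <;> simp [PySem.Chars.count.go]
  | cons h t ih =>
    intro fuel acc hle
    cases fuel with
    | zero => simp at hle
    | succ n =>
      by_cases hc : c = h
      · subst hc
        have h1 : PySem.Chars.count.go [c] (n + 1) (c :: t) acc
            = PySem.Chars.count.go [c] n t (acc + 1) := by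
          simp [PySem.Chars.count.go, List.isPrefixOf]
        rw [h1, ih n (acc + 1) (by simpa using hle)]
        simp [List.count_cons]
        omega
      · have hb : (c == h) = false := by simp [hc]
        have h1 : PySem.Chars.count.go [c] (n + 1) (h :: t) acc
            = PySem.Chars.count.go [c] n t acc := by
          simp [PySem.Chars.count.go, List.isPrefixOf, hb]
        rw [h1, ih n acc (by simpa using hle)]
        simp [List.count_cons]
        exact fun hh => hc hh.symm

theorem count_singleton (l : List Char) (c : Char) :
    PySem.Chars.count l [c] = l.count c := by
  have h := count_go_singleton c l l.length 0 le_rfl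
  simp only [PySem.Chars.count]
  rw [if_neg (by simp)]
  simpa using h

theorem infix_singleton {c : Char} {l : List Char} : [c] <:+: l ↔ c ∈ l := by
  constructor
  · rintro ⟨s, t, rfl⟩; simp
  · intro h
    obtain ⟨s, t, rfl⟩ := List.append_of_mem h
    exact ⟨s, t, by simp⟩

-- the single-pass loop computed in closed form
theorem vsLoop_eq : ∀ (l : List Char) (sq par : Int),
    vsLoop l sq par =
      if l.any (fun c => c == '<' || c == '>' || c == '"' || c == '\'') then false
      else decide (sq + l.count '[' = l.count ']') &&
           decide (par + l.count '(' = l.count ')') := by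
  intro l
  induction l with
  | nil =>
    intro sq par
    by_cases hsq : sq = 0 <;> by_cases hpar : par = 0 <;> simp [vsLoop, hsq, hpar]
  | cons h t ih =>
    intro sq par
    by_cases hbad : (h == '<' || h == '>' || h == '"' || h == '\'') = true
    · simp [vsLoop, hbad]
    · rw [Bool.not_eq_true] at hbad
      have hcls : h = '[' ∨ h = ']' ∨ h = '(' ∨ h = ')' ∨
          (h ≠ '[' ∧ h ≠ ']' ∧ h ≠ '(' ∧ h ≠ ')') := by tauto
      rcases hcls with hs | hs | hs | hs | ⟨n1, n2, n3, n4⟩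
      · subst hs
        simp only [vsLoop]
        rw [if_neg (by decide), if_pos (by decide), ih]
        conv_rhs => rw [List.any_cons]
        rw [show (('[' == '<' || '[' == '>' || '[' == '"' || '[' == '\'')) = false from by decide,
          Bool.false_or]
        by_cases hany : (t.any fun c => c == '<' || c == '>' || c == '"' || c == '\'') = true
        · simp [hany]
        · rw [Bool.not_eq_true] at hany
          rw [if_neg (by simp [hany]), if_neg (by simp [hany])]
          simp only [List.count_cons]
          congr 1 <;> refine decide_eq_decide.mpr ?_ <;> · simp; omega
      · subst hs
        simp only [vsLoop]
        rw [if_neg (by decide), if_neg (by decide), if_pos (by decide), ih]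
        conv_rhs => rw [List.any_cons]
        rw [show ((']' == '<' || ']' == '>' || ']' == '"' || ']' == '\'')) = false from by decide,
          Bool.false_or]
        by_cases hany : (t.any fun c => c == '<' || c == '>' || c == '"' || c == '\'') = true
        · simp [hany]
        · rw [Bool.not_eq_true] at hany
          rw [if_neg (by simp [hany]), if_neg (by simp [hany])]
          simp only [List.count_cons]
          congr 1 <;> refine decide_eq_decide.mpr ?_ <;> · simp; omega
      · subst hs
        simp only [vsLoop]
        rw [if_neg (by decide), if_neg (by decide), if_neg (by decide), if_pos (by decide), ih]
        conv_rhs => rw [List.any_cons]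
        rw [show (('(' == '<' || '(' == '>' || '(' == '"' || '(' == '\'')) = false from by decide,
          Bool.false_or]
        by_cases hany : (t.any fun c => c == '<' || c == '>' || c == '"' || c == '\'') = true
        · simp [hany]
        · rw [Bool.not_eq_true] at hany
          rw [if_neg (by simp [hany]), if_neg (by simp [hany])]
          simp only [List.count_cons]
          congr 1 <;> refine decide_eq_decide.mpr ?_ <;> · simp; omega
      · subst hs
        simp only [vsLoop]
        rw [if_neg (by decide), if_neg (by decide), if_neg (by decide), if_neg (by decide), if_pos (by decide), ih]
        conv_rhs => rw [List.any_cons]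
        rw [show ((')' == '<' || ')' == '>' || ')' == '"' || ')' == '\'')) = false from by decide,
          Bool.false_or]
        by_cases hany : (t.any fun c => c == '<' || c == '>' || c == '"' || c == '\'') = true
        · simp [hany]
        · rw [Bool.not_eq_true] at hany
          rw [if_neg (by simp [hany]), if_neg (by simp [hany])]
          simp only [List.count_cons]
          congr 1 <;> refine decide_eq_decide.mpr ?_ <;> · simp; omega
      · -- ordinary character: nothing changes
        simp only [vsLoop]
        rw [if_neg (by simp [hbad]), if_neg (by simp [n1]), if_neg (by simp [n2]),
          if_neg (by simp [n3]), if_neg (by simp [n4]), ih]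
        conv_rhs => rw [List.any_cons]
        rw [show ((h == '<' || h == '>' || h == '"' || h == '\'')) = false from hbad,
          Bool.false_or]
        by_cases hany : (t.any fun c => c == '<' || c == '>' || c == '"' || c == '\'') = true
        · simp [hany]
        · rw [Bool.not_eq_true] at hany
          rw [if_neg (by simp [hany]), if_neg (by simp [hany])]
          simp [List.count_cons, n1, n2, n3, n4]

-- ===== VERDICT (by name: the statement is the Claim_ definition above) =====
theorem validate_selector_spec : Claim_equal_validate_selector := by
  intro selector _
  unfold Spec_validate_selector validate_selector validate_selector_alt
  rw [vsLoop_eq]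
  have hc1 : PySem.Str.count selector "[" = selector.toList.count '[' := by
    rw [PySem.Str.count_eq]; exact count_singleton _ _
  have hc2 : PySem.Str.count selector "]" = selector.toList.count ']' := by
    rw [PySem.Str.count_eq]; exact count_singleton _ _
  have hc3 : PySem.Str.count selector "(" = selector.toList.count '(' := by
    rw [PySem.Str.count_eq]; exact count_singleton _ _
  have hc4 : PySem.Str.count selector ")" = selector.toList.count ')' := by
    rw [PySem.Str.count_eq]; exact count_singleton _ _
  have hmem : ∀ (c : Char) (ch : String), ch.toList = [c] →
      (PySem.Str.isIn ch selector = true ↔ c ∈ selector.toList) := by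
    intro c ch h
    rw [PySem.Str.isIn_eq, h, PySem.Chars.isIn_iff_infix, infix_singleton]
  rw [hc1, hc2, hc3, hc4]
  by_cases hany :
      (selector.toList.any fun c => c == '<' || c == '>' || c == '"' || c == '\'') = true
  · simp only [hany, if_true]
    rw [List.any_eq_true] at hany
    obtain ⟨c, hc, hcc⟩ := hany
    have hIn : (["<", ">", "\"", "'"].any fun ch => PySem.Str.isIn ch selector) = true := by
      rw [List.any_eq_true]
      have hcc' : ((c = '<' ∨ c = '>') ∨ c = '"') ∨ c = '\'' := by simpa using hcc
      rcases hcc' with ((h | h) | h) | h <;> subst h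
      · exact ⟨"<", by simp, (hmem _ _ rfl).mpr hc⟩
      · exact ⟨">", by simp, (hmem _ _ rfl).mpr hc⟩
      · exact ⟨"\"", by simp, (hmem _ _ rfl).mpr hc⟩
      · exact ⟨"'", by simp, (hmem _ _ rfl).mpr hc⟩
    rw [hIn]
    split_ifs with h1 h2 h3 <;> first | rfl | exact absurd rfl h3
  · rw [Bool.not_eq_true] at hany
    rw [hany]
    simp only [Bool.false_eq_true, if_false]
    have hnotin : ∀ c : Char, (c == '<' || c == '>' || c == '"' || c == '\'') = true →
        c ∉ selector.toList := by
      intro c hcbad hcmem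
      rw [List.any_eq_false] at hany
      exact absurd hcbad (by simpa using hany c hcmem)
    have hnone : (["<", ">", "\"", "'"].any fun ch => PySem.Str.isIn ch selector) = false := by
      rw [List.any_eq_false]
      intro ch hch
      have hch' : ch = "<" ∨ ch = ">" ∨ ch = "\"" ∨ ch = "'" := by simpa using hch
      rcases hch' with h | h | h | h <;> subst h <;> · intro hx; exact hnotin _ (by decide) ((hmem _ _ rfl).mp hx)
    rw [hnone]
    simp only [Bool.false_eq_true, if_false]
    have r1 : decide ((0 : Int) + (selector.toList.count '[' : Int)
          = (selector.toList.count ']' : Int))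
        = decide (selector.toList.count '[' = selector.toList.count ']') :=
      decide_eq_decide.mpr (by omega)
    have r2 : decide ((0 : Int) + (selector.toList.count '(' : Int)
          = (selector.toList.count ')' : Int))
        = decide (selector.toList.count '(' = selector.toList.count ')') :=
      decide_eq_decide.mpr (by omega)
    rw [r1, r2]
    by_cases d1 : selector.toList.count '[' = selector.toList.count ']' <;>
      by_cases d2 : selector.toList.count '(' = selector.toList.count ')' <;>
      simp [d1, d2]
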